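-- pv_equiv track=rewrite | github.com/MrBrantCode/unitest_baseline | mut_generate/mist_test_cf/cf_9193/solution.py | find_top_strings
-- ===== SOURCE A (Python) =====
-- def find_top_strings(arr):
--     topStrings = []
--     maxLength = 0
--
--     for string in arr:
--         if len(string) > maxLength:
--             maxLength = len(string)
--             topStrings = []
--             topStrings.append(string)
--         elif len(topStrings) < 3 and string not in topStrings and len(string) == maxLength:
--             topStrings.append(string)
--
--     return topStrings
-- ===== SOURCE B (Python) =====
-- def find_top_strings(arr):
--     M = max((len(s) for s in arr), default=0)
--     res = []
--     for s in arr: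
--         if len(s) == M and s not in res and len(res) < 3:
--             res.append(s)
--     return res
-- ===== Notes on version B (the rewrite author's own statement) =====
-- stated objective: simpler
-- what changed: Replaces the online running-max-with-reset single pass by a two-pass decomposition: compute the global maximum length first, then collect up to 3 distinct strings of that length in order.
import Mathlib
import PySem

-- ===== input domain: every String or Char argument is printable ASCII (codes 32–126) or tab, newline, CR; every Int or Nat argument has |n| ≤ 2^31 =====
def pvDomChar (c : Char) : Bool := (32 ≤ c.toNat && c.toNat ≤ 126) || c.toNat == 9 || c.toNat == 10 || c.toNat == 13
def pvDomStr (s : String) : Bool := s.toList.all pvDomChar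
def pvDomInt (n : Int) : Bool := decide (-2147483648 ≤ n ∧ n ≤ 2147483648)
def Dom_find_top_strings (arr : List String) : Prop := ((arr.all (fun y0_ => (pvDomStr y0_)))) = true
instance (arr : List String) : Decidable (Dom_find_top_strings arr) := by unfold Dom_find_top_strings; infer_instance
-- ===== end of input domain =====

-- B replaces A's online running-max-with-reset single pass by a simpler two-pass
-- decomposition: compute the global maximum length, then collect up to 3 distinct
-- strings of that length in first-appearance order (objective: simpler).


-- ===== PORT A =====
-- one loop iteration of A: state = (topStrings, maxLength)
def pvStepA (st : List String × Int) (s : String) : List String × Int :=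
  if PySem.Str.len s > st.2 then ([s], PySem.Str.len s)
  else if st.1.length < 3 ∧ s ∉ st.1 ∧ PySem.Str.len s = st.2 then (st.1 ++ [s], st.2)
  else st

def find_top_strings (arr : List String) : List String :=
  (arr.foldl pvStepA (([] : List String), (0 : Int))).1

-- ===== PORT B =====
-- max((len(s) for s in arr), default=0)
def pvMaxLen (arr : List String) : Int :=
  arr.foldl (fun m s => max m (PySem.Str.len s)) 0

-- one iteration of B's collecting loop (M is the global max length)
def pvStepB (M : Int) (res : List String) (s : String) : List String :=
  if PySem.Str.len s = M ∧ s ∉ res ∧ res.length < 3 then res ++ [s] else res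

def find_top_strings_alt (arr : List String) : List String :=
  arr.foldl (pvStepB (pvMaxLen arr)) []

-- ===== PRECONDITION & SPEC =====
def Spec_find_top_strings (arr : List String) (out : List String) : Prop := out = find_top_strings_alt arr
instance (arr : List String) (out : List String) : Decidable (Spec_find_top_strings arr out) := by unfold Spec_find_top_strings; infer_instance

-- ===== CLAIM (what is proved, stated in full; the proofs are below) =====
def Claim_equal_find_top_strings : Prop := ∀ (arr : List String), Dom_find_top_strings arr → Spec_find_top_strings arr (find_top_strings arr)

-- ===== LEMMAS AND PROOFS =====

theorem pvMaxLen_append (p : List String) (s : String) :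
    pvMaxLen (p ++ [s]) = max (pvMaxLen p) (PySem.Str.len s) := by
  simp [pvMaxLen, List.foldl_append]

theorem le_pvMaxLen (p : List String) (x : String) (hx : x ∈ p) :
    PySem.Str.len x ≤ pvMaxLen p := by
  have key : ∀ (p : List String) (m : Int), m ≤ p.foldl (fun m s => max m (PySem.Str.len s)) m := by
    intro p
    induction p with
    | nil => intro m; simp
    | cons a t ih =>
      intro m
      have := ih (max m (PySem.Str.len a))
      simp only [List.foldl_cons]
      exact le_trans (le_max_left _ _) this
  induction p with
  | nil => cases hx
  | cons a t ih =>
    rcases List.mem_cons.mp hx with h | h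
    · subst h
      have := key t (max 0 (PySem.Str.len x))
      simp only [pvMaxLen, List.foldl_cons]
      exact le_trans (le_max_right _ _) this
    · have := ih h
      have mono : ∀ (t : List String) (m m' : Int), m ≤ m' →
          t.foldl (fun m s => max m (PySem.Str.len s)) m ≤ t.foldl (fun m s => max m (PySem.Str.len s)) m' := by
        intro t
        induction t with
        | nil => intro m m' h; simpa using h
        | cons b u ihu =>
          intro m m' h
          simp only [List.foldl_cons]
          exact ihu _ _ (max_le_max_right _ h)
      simp only [pvMaxLen, List.foldl_cons] at this ⊢
      exact le_trans this (mono t _ _ (by simp))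

theorem collect_nil (p : List String) (M : Int) (h : ∀ x ∈ p, PySem.Str.len x < M) :
    p.foldl (pvStepB M) [] = [] := by
  induction p with
  | nil => rfl
  | cons a t ih =>
    have ha : PySem.Str.len a ≠ M := ne_of_lt (h a (List.mem_cons_self))
    simp only [List.foldl_cons, pvStepB, ha, false_and, if_false]
    exact ih (fun x hx => h x (List.mem_cons_of_mem _ hx))

theorem main_inv (arr : List String) :
    arr.foldl pvStepA (([] : List String), (0 : Int)) =
      (arr.foldl (pvStepB (pvMaxLen arr)) [], pvMaxLen arr) := by
  induction arr using List.reverseRecOn with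
  | nil => rfl
  | append_singleton p s ih =>
    rw [List.foldl_append, List.foldl_append, ih, pvMaxLen_append]
    by_cases hgt : PySem.Str.len s > pvMaxLen p
    · have hM : max (pvMaxLen p) (PySem.Str.len s) = PySem.Str.len s := max_eq_right (le_of_lt hgt)
      rw [hM]
      have hnil : p.foldl (pvStepB (PySem.Str.len s)) [] = [] :=
        collect_nil p _ (fun x hx => lt_of_le_of_lt (le_pvMaxLen p x hx) hgt)
      rw [hnil]
      simp only [List.foldl_cons, List.foldl_nil, pvStepA, pvStepB, if_pos hgt]
      simp
    · have hM : max (pvMaxLen p) (PySem.Str.len s) = pvMaxLen p :=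
        max_eq_left (le_of_not_gt hgt)
      rw [hM]
      simp only [List.foldl_cons, List.foldl_nil, pvStepA, pvStepB, hgt, if_false]
      split_ifs with h1 h2 h2
      · rfl
      · exact absurd ⟨h1.2.2, h1.2.1, h1.1⟩ h2
      · exact absurd ⟨h2.2.2, h2.2.1, h2.1⟩ h1
      · rfl

-- ===== VERDICT (by name: the statement is the Claim_ definition above) =====
theorem find_top_strings_spec : Claim_equal_find_top_strings := by
  intro arr _
  unfold Spec_find_top_strings find_top_strings find_top_strings_alt
  rw [main_inv]
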